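-- pv_equiv track=rewrite | github.com/wnsmir/Algorithm | 프로그래머스/2/250136. ［PCCP 기출문제］ 2번 ／ 석유 시추/［PCCP 기출문제］ 2번 ／ 석유 시추.py | solution
-- ===== SOURCE A (Python) =====
-- def solution(land):
--     from collections import deque
--
--     n = len(land)
--     m = len(land[0])
--     visited = [[False] * m for _ in range(n)]
--     col_oil = [0] * m
--
--     dx = [1, -1, 0, 0]
--     dy = [0, 0, 1, -1]
--
--     for i in range(n):
--         for j in range(m):
--             if land[i][j] == 1 and not visited[i][j]:
--                 # BFS 시작
--                 queue = deque()
--                 queue.append((i, j))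
--                 visited[i][j] = True
--                 size = 1
--                 cols = set()
--                 cols.add(j)
--
--                 while queue:
--                     x, y = queue.popleft()
--                     for d in range(4):
--                         nx = x + dx[d]
--                         ny = y + dy[d]
--                         if 0 <= nx < n and 0 <= ny < m:
--                             if land[nx][ny] == 1 and not visited[nx][ny]:
--                                 visited[nx][ny] = True
--                                 queue.append((nx, ny))
--                                 cols.add(ny)
--                                 size += 1
--
--                 # 걸쳐 있는 열에 석유량 누적
--                 for c in cols:
--                     col_oil[c] += size
--
--     return max(col_oil)
-- ===== SOURCE B (Python) =====
-- def solution(land):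
--     n = len(land)
--     m = len(land[0])
--
--     # Stage 1: collect the connected components, growing each one by
--     # round-based frontier saturation (no BFS queue, no per-cell visited marking).
--     seen = set()
--     comps = []
--     for i in range(n):
--         for j in range(m):
--             if land[i][j] == 1 and (i, j) not in seen:
--                 comp = {(i, j)}
--                 while True:
--                     new = {(x, y)
--                            for (px, py) in comp
--                            for (x, y) in ((px + 1, py), (px - 1, py), (px, py + 1), (px, py - 1))
--                            if 0 <= x < n and 0 <= y < m
--                            and land[x][y] == 1 and (x, y) not in comp}
--                     if not new:
--                         break
--                     comp |= new
--                 seen |= comp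
--                 comps.append(comp)
--
--     # Stage 2: per column, sum the sizes of the components touching it; no
--     # col_oil array is maintained during the scan.
--     return max(sum(len(comp) for comp in comps if any(y == c for (_, y) in comp))
--                for c in range(m))
-- ===== Notes on version B (the rewrite author's own statement) =====
-- stated objective: alternative
-- what changed: Two staged passes replace A's single fused scan: components are grown by round-based frontier saturation (whole-set fixpoint expansion instead of a BFS queue with visited marking) and collected into a list, and the answer is then computed per column by summing sizes of the components touching that column, instead of bumping a col_oil array inside the traversal.
import Mathlib
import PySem

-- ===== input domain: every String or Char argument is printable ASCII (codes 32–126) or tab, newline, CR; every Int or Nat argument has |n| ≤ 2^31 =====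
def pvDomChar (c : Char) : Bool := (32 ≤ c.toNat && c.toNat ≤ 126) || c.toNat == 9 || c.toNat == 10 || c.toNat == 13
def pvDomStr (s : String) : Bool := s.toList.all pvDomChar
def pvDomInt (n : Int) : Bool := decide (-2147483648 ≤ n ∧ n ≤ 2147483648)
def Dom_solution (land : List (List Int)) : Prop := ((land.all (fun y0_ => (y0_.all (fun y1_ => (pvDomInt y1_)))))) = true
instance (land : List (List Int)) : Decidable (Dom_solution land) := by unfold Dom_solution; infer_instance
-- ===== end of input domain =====

-- B stages the work differently from A: it first collects the connected components
-- (grown by round-based frontier saturation, no BFS queue and no visited marking),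
-- then computes each column's total as a sum over that list; an alternative of
-- similar cost (equivalence of the RETURN value is proved).

-- ===== PORT A =====
-- A's grid accessor land[x][y] (called only after the 0<=x<n, 0<=y<m guards, where it is exact)
def cellA (land : List (List Int)) (x y : Int) : Int :=
  (PySem.List.pyGet? ((PySem.List.pyGet? land x).getD []) y).getD 0

-- the dx/dy neighbour offsets, applied to (x, y)
def nbrsA (x y : Int) : List (Int × Int) := [(x+1, y), (x-1, y), (x, y+1), (x, y-1)]

-- body of 'for d in range(4)': state is (queue, visited, size, cols)
def stepA (land : List (List Int)) (n m : Int)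
    (st : List (Int × Int) × PySem.Set (Int × Int) × Int × PySem.Set Int) (c : Int × Int) :
    List (Int × Int) × PySem.Set (Int × Int) × Int × PySem.Set Int :=
  if 0 ≤ c.1 ∧ c.1 < n ∧ 0 ≤ c.2 ∧ c.2 < m ∧ cellA land c.1 c.2 = 1 ∧ c ∉ st.2.1 then
    (st.1 ++ [c], PySem.Set.add st.2.1 c, st.2.2.1 + 1, PySem.Set.add st.2.2.2 c.2)
  else st

-- 'while queue:' (fuel bounds the number of pops; 2*n*m+1 is always enough)
def bfsA (land : List (List Int)) (n m : Int) :
    Nat → List (Int × Int) → PySem.Set (Int × Int) → Int → PySem.Set Int →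
    PySem.Set (Int × Int) × Int × PySem.Set Int
  | 0, _, vis, size, cols => (vis, size, cols)
  | _+1, [], vis, size, cols => (vis, size, cols)
  | fuel+1, c :: qs, vis, size, cols =>
    let st := (nbrsA c.1 c.2).foldl (stepA land n m) (qs, vis, size, cols)
    bfsA land n m fuel st.1 st.2.1 st.2.2.1 st.2.2.2

-- 'col_oil[c] += size'
def bumpA (size : Int) (co : List Int) (c : Int) : List Int :=
  PySem.List.pySetD co c (PySem.List.pyGetD co c 0 + size)

-- body of the double scan loop: state is (visited, col_oil)
def scanA (land : List (List Int)) (n m : Int)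
    (st : PySem.Set (Int × Int) × List Int) (p : Int × Int) :
    PySem.Set (Int × Int) × List Int :=
  if cellA land p.1 p.2 = 1 ∧ p ∉ st.1 then
    let r := bfsA land n m (2 * (n.toNat * m.toNat) + 1)
      [p] (PySem.Set.add st.1 p) 1 (PySem.Set.add PySem.Set.empty p.2)
    (r.1, r.2.2.foldl (bumpA r.2.1) st.2)
  else st

def solution (land : List (List Int)) : Int :=
  let n : Int := land.length
  let m : Int := ((PySem.List.pyGet? land 0).getD []).length
  let cells := (PySem.List.pyRange 0 n 1).flatMap
    (fun i => (PySem.List.pyRange 0 m 1).map (fun j => (i, j)))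
  let st := cells.foldl (scanA land n m) (PySem.Set.empty, List.replicate m.toNat 0)
  (PySem.List.max? st.2 (fun v => v)).getD 0

-- ===== PORT B =====
def cellB (land : List (List Int)) (x y : Int) : Int :=
  (PySem.List.pyGet? ((PySem.List.pyGet? land x).getD []) y).getD 0

-- the 'new' frontier set comprehension (inline neighbour tuples, as in Source B)
def growB (land : List (List Int)) (n m : Int) (comp : PySem.Set (Int × Int)) :
    PySem.Set (Int × Int) :=
  PySem.Set.ofList ((comp.flatMap
      (fun p => [(p.1 + 1, p.2), (p.1 - 1, p.2), (p.1, p.2 + 1), (p.1, p.2 - 1)])).filter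
    (fun c => decide (0 ≤ c.1 ∧ c.1 < n ∧ 0 ≤ c.2 ∧ c.2 < m ∧
      cellB land c.1 c.2 = 1 ∧ c ∉ comp)))

-- 'while True: … if not new: break; comp |= new' (fuel n*m+1 is always enough)
def satB (land : List (List Int)) (n m : Int) :
    Nat → PySem.Set (Int × Int) → PySem.Set (Int × Int)
  | 0, comp => comp
  | fuel+1, comp =>
    let nw := growB land n m comp
    if nw.isEmpty then comp else satB land n m fuel (PySem.Set.union comp nw)

-- stage-1 loop body: state is (seen, comps); the finished component is APPENDED
def collectB (land : List (List Int)) (n m : Int)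
    (st : PySem.Set (Int × Int) × List (PySem.Set (Int × Int))) (p : Int × Int) :
    PySem.Set (Int × Int) × List (PySem.Set (Int × Int)) :=
  if cellB land p.1 p.2 = 1 ∧ p ∉ st.1 then
    let comp := satB land n m (n.toNat * m.toNat + 1) (PySem.Set.add PySem.Set.empty p)
    (PySem.Set.union st.1 comp, st.2 ++ [comp])
  else st

-- 'sum(len(comp) for comp in comps if any(y == c for (_, y) in comp))'
def colSumB (comps : List (PySem.Set (Int × Int))) (c : Int) : Int :=
  comps.foldl
    (fun acc comp => acc + (if comp.any (fun x => x.2 == c) then PySem.Set.len comp else 0)) 0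

def solution_alt (land : List (List Int)) : Int :=
  let n : Int := land.length
  let m : Int := ((PySem.List.pyGet? land 0).getD []).length
  let cells := (PySem.List.pyRange 0 n 1).flatMap
    (fun i => (PySem.List.pyRange 0 m 1).map (fun j => (i, j)))
  let st := cells.foldl (collectB land n m) (PySem.Set.empty, [])
  (PySem.List.max? ((PySem.List.pyRange 0 m 1).map (fun c => colSumB st.2 c))
    (fun v => v)).getD 0

-- ===== PRECONDITION & SPEC =====
-- Pre_ excludes exactly the inputs on which A raises: the empty grid / empty first row
-- (IndexError on land[0], max() of an empty col_oil) and grids with a row shorter than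
-- row 0, on which A's scan land[i][j] raises IndexError.
def Pre_solution (land : List (List Int)) : Prop :=
  land ≠ [] ∧ (land.headD []) ≠ [] ∧ ∀ row ∈ land, (land.headD []).length ≤ row.length
instance (land : List (List Int)) : Decidable (Pre_solution land) := by
  unfold Pre_solution; infer_instance

def pvWitness_solution : List (List Int) := [[1, 0], [0, 1]]

def Spec_solution (land : List (List Int)) (out : Int) : Prop := out = solution_alt land
instance (land : List (List Int)) (out : Int) : Decidable (Spec_solution land out) := by
  unfold Spec_solution; infer_instance

-- ===== CLAIM (what is proved, stated in full; the proofs are below) =====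
def Claim_equal_solution : Prop :=
  ∀ (land : List (List Int)), Dom_solution land → Pre_solution land →
    Spec_solution land (solution land)

-- ===== LEMMAS AND PROOFS =====

-- the guard both programs test before flooding into a cell
def GoodP (land : List (List Int)) (n m : Int) (c : Int × Int) : Prop :=
  0 ≤ c.1 ∧ c.1 < n ∧ 0 ≤ c.2 ∧ c.2 < m ∧ cellA land c.1 c.2 = 1

def AdjP (a b : Int × Int) : Prop := b ∈ nbrsA a.1 a.2

def ClosedP (land : List (List Int)) (n m : Int) (S : Int × Int → Prop) : Prop :=
  ∀ a, S a → ∀ b, AdjP a b → GoodP land n m b → S b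

def clP (land : List (List Int)) (n m : Int) (S : Int × Int → Prop) (x : Int × Int) : Prop :=
  ∀ T : Int × Int → Prop, (∀ y, S y → T y) → ClosedP land n m T → T x

theorem adj_symm {a b : Int × Int} (h : AdjP a b) : AdjP b a := by
  obtain ⟨a1, a2⟩ := a
  obtain ⟨b1, b2⟩ := b
  simp only [AdjP, nbrsA, List.mem_cons, Prod.mk.injEq, List.not_mem_nil, or_false] at h ⊢
  rcases h with ⟨rfl, rfl⟩ | ⟨rfl, rfl⟩ | ⟨rfl, rfl⟩ | ⟨rfl, rfl⟩ <;> norm_num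

theorem nbrs_nodup (x y : Int) : (nbrsA x y).Nodup := by
  simp only [nbrsA, List.nodup_cons, List.mem_cons,
    List.not_mem_nil, Prod.mk.injEq, List.nodup_nil, or_false, not_or, and_true]
  norm_num
  exact ⟨by omega, by omega⟩

theorem cl_base {land n m S x} (h : S x) : clP land n m S x :=
  fun _ hS _ => hS x h

theorem cl_closed (land n m S) : ClosedP land n m (clP land n m S) := by
  intro a ha b hab hb T hS hT
  exact hT a (ha T hS hT) b hab hb

theorem cl_of_closed {land n m S} (h : ClosedP land n m S) (x) :
    clP land n m S x ↔ S x :=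
  ⟨fun hc => hc S (fun _ hy => hy) h, cl_base⟩

theorem cl_mono {land n m S S'} (h : ∀ y, S y → S' y) {x}
    (hx : clP land n m S x) : clP land n m S' x :=
  fun T hS hT => hx T (fun y hy => hS y (h y hy)) hT

theorem closed_union {land n m S T} (hS : ClosedP land n m S) (hT : ClosedP land n m T) :
    ClosedP land n m (fun x => S x ∨ T x) := by
  rintro a (ha | ha) b hab hb
  · exact Or.inl (hS a ha b hab hb)
  · exact Or.inr (hT a ha b hab hb)

theorem closed_congr {land n m S T} (h : ∀ x, S x ↔ T x)
    (hS : ClosedP land n m S) : ClosedP land n m T := by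
  intro a ha b hab hb
  exact (h b).mp (hS a ((h a).mpr ha) b hab hb)

-- absorbing extra seeds that already lie in the closure
theorem cl_absorb {land n m S S'} (h1 : ∀ y, S' y → clP land n m S y)
    (h2 : ∀ y, S y → S' y) (x) : clP land n m S' x ↔ clP land n m S x := by
  constructor
  · intro hx
    exact hx (clP land n m S) h1 (cl_closed land n m S)
  · exact cl_mono h2

theorem cl_congr {land n m S S'} (h : ∀ y, S y ↔ S' y) (x) :
    clP land n m S x ↔ clP land n m S' x :=
  ⟨cl_mono (fun y hy => (h y).mp hy), cl_mono (fun y hy => (h y).mpr hy)⟩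

theorem cl_union_left {land n m v S} (hv : ClosedP land n m v) (x) :
    clP land n m (fun y => v y ∨ S y) x ↔ v x ∨ clP land n m S x := by
  constructor
  · intro hx
    refine hx (fun y => v y ∨ clP land n m S y) ?_ ?_
    · rintro y (hy | hy)
      · exact Or.inl hy
      · exact Or.inr (cl_base hy)
    · exact closed_union hv (cl_closed land n m S)
  · rintro (hx | hx)
    · exact cl_base (Or.inl hx)
    · exact cl_mono (fun y hy => Or.inr hy) hx

theorem cl_good_or {land n m S x} (hx : clP land n m S x) :
    S x ∨ GoodP land n m x := by
  refine hx (fun y => S y ∨ GoodP land n m y) (fun y hy => Or.inl hy) ?_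
  intro a _ b _ hb
  exact Or.inr hb

-- a closed visited set never meets the component grown from an unvisited good seed
theorem cl_disjoint {land n m v} (hv : ClosedP land n m v) {s : Int × Int}
    (hs : ¬ v s) (hgs : GoodP land n m s) {x} (hx : clP land n m (· = s) x) : ¬ v x := by
  have key := hx (fun y => clP land n m (· = s) y ∧ ¬ v y) ?_ ?_
  · exact key.2
  · intro y hy
    subst hy
    exact ⟨cl_base rfl, hs⟩
  · rintro a ⟨ha, hav⟩ b hab hb
    refine ⟨cl_closed land n m _ a ha b hab hb, fun hvb => hav ?_⟩
    have hga : GoodP land n m a := by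
      rcases cl_good_or ha with h | h
      · exact h ▸ hgs
      · exact h
    exact hv b hvb a (adj_symm hab) hga

-- the finite set of floodable cells, for the fuel bound
noncomputable def goodFin (land : List (List Int)) (n m : Int) : Finset (Int × Int) :=
  ((Finset.Icc 0 (n-1)) ×ˢ (Finset.Icc 0 (m-1))).filter
    (fun c => cellA land c.1 c.2 = 1)

theorem mem_goodFin {land n m c} : c ∈ goodFin land n m ↔ GoodP land n m c := by
  simp only [goodFin, GoodP, Finset.mem_filter, Finset.mem_product, Finset.mem_Icc]
  constructor
  · rintro ⟨⟨⟨h1, h2⟩, h3, h4⟩, h5⟩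
    exact ⟨h1, by omega, h3, by omega, h5⟩
  · rintro ⟨h1, h2, h3, h4, h5⟩
    exact ⟨⟨⟨h1, by omega⟩, h3, by omega⟩, h5⟩

theorem goodFin_card (land : List (List Int)) (n m : Int) :
    (goodFin land n m).card ≤ n.toNat * m.toNat := by
  calc (goodFin land n m).card
      ≤ ((Finset.Icc (0:Int) (n-1)) ×ˢ (Finset.Icc (0:Int) (m-1))).card :=
        Finset.card_filter_le _ _
    _ = (Finset.Icc (0:Int) (n-1)).card * (Finset.Icc (0:Int) (m-1)).card :=
        Finset.card_product _ _
    _ ≤ n.toNat * m.toNat := by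
        rw [Int.card_Icc, Int.card_Icc]
        apply Nat.mul_le_mul <;> omega

-- closed form of the 'for d in range(4)' fold
def nsF (land : List (List Int)) (n m : Int) (vis : PySem.Set (Int × Int))
    (cs : List (Int × Int)) : List (Int × Int) :=
  cs.filter (fun c => decide (0 ≤ c.1 ∧ c.1 < n ∧ 0 ≤ c.2 ∧ c.2 < m ∧
    cellA land c.1 c.2 = 1 ∧ c ∉ vis))

theorem mem_nsF {land n m vis cs c} :
    c ∈ nsF land n m vis cs ↔ c ∈ cs ∧ GoodP land n m c ∧ c ∉ vis := by
  simp only [nsF, List.mem_filter, decide_eq_true_eq, GoodP]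
  exact ⟨fun ⟨h1, h2, h3, h4, h5, h6, h7⟩ => ⟨h1, ⟨h2, h3, h4, h5, h6⟩, h7⟩,
    fun ⟨h1, ⟨h2, h3, h4, h5, h6⟩, h7⟩ => ⟨h1, h2, h3, h4, h5, h6, h7⟩⟩

theorem nodup_nsF {land n m vis cs} (h : List.Nodup cs) :
    (nsF land n m vis cs).Nodup := h.filter _

theorem nsF_grow {land n m vis cs} {c : Int × Int} (hc : c ∉ cs) :
    nsF land n m (vis ++ [c]) cs = nsF land n m vis cs := by
  apply List.filter_congr
  intro x hx
  have hne : x ≠ c := fun h => hc (h ▸ hx)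
  simp [List.mem_append, hne]

theorem foldA_spec (land : List (List Int)) (n m : Int) :
    ∀ (cs : List (Int × Int)), cs.Nodup →
    ∀ (q : List (Int × Int)) (vis : PySem.Set (Int × Int)) (size : Int)
      (cols : PySem.Set Int),
    cs.foldl (stepA land n m) (q, vis, size, cols) =
      (q ++ nsF land n m vis cs,
       vis ++ nsF land n m vis cs,
       size + (nsF land n m vis cs).length,
       (nsF land n m vis cs).foldl (fun s c => PySem.Set.add s c.2) cols) := by
  intro cs
  induction cs with
  | nil => intro _ q vis size cols; simp [nsF]
  | cons c cs ih =>
    intro hnd q vis size cols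
    obtain ⟨hcc, hnd'⟩ := List.nodup_cons.mp hnd
    by_cases hc : GoodP land n m c ∧ c ∉ vis
    · have hcond : 0 ≤ c.1 ∧ c.1 < n ∧ 0 ≤ c.2 ∧ c.2 < m ∧ cellA land c.1 c.2 = 1 ∧
          c ∉ vis := ⟨hc.1.1, hc.1.2.1, hc.1.2.2.1, hc.1.2.2.2.1, hc.1.2.2.2.2, hc.2⟩
      have hstep : stepA land n m (q, vis, size, cols) c =
          (q ++ [c], vis ++ [c], size + 1, PySem.Set.add cols c.2) := by
        simp only [stepA, if_pos hcond]
        rw [PySem.Set.add_of_not_mem hc.2]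
      have hfil : nsF land n m vis (c :: cs) = c :: nsF land n m vis cs := by
        simp only [nsF, List.filter_cons]
        rw [if_pos (decide_eq_true hcond)]
      rw [List.foldl_cons, hstep, ih hnd' (q ++ [c]) (vis ++ [c]) (size + 1)
        (PySem.Set.add cols c.2), nsF_grow hcc, hfil]
      simp only [List.append_assoc, List.singleton_append, List.length_cons,
        List.foldl_cons, Prod.mk.injEq]
      refine ⟨trivial, trivial, by omega, trivial⟩
    · have hcond : ¬ (0 ≤ c.1 ∧ c.1 < n ∧ 0 ≤ c.2 ∧ c.2 < m ∧ cellA land c.1 c.2 = 1 ∧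
          c ∉ vis) := by
        rintro ⟨h1, h2, h3, h4, h5, h6⟩
        exact hc ⟨⟨h1, h2, h3, h4, h5⟩, h6⟩
      have hstep : stepA land n m (q, vis, size, cols) c = (q, vis, size, cols) := by
        simp only [stepA, if_neg hcond]
      have hfil : nsF land n m vis (c :: cs) = nsF land n m vis cs := by
        simp only [nsF, List.filter_cons]
        rw [if_neg (by simpa using hcond)]
      rw [List.foldl_cons, hstep, ih hnd' q vis size cols, hfil]

-- membership and nodup of a fold of Set.add over second components
theorem mem_foldl_add_snd (l : List (Int × Int)) (cols : PySem.Set Int) (x : Int) :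
    x ∈ l.foldl (fun s c => PySem.Set.add s c.2) cols ↔
      x ∈ cols ∨ ∃ c ∈ l, c.2 = x := by
  induction l generalizing cols with
  | nil => simp
  | cons c cs ih =>
    simp only [List.foldl_cons, ih, PySem.Set.mem_add, List.mem_cons]
    constructor
    · rintro ((h | h) | ⟨d, hd, rfl⟩)
      · exact Or.inl h
      · exact Or.inr ⟨c, Or.inl rfl, h.symm⟩
      · exact Or.inr ⟨d, Or.inr hd, rfl⟩
    · rintro (h | ⟨d, (rfl | hd), rfl⟩)
      · exact Or.inl (Or.inl h)
      · exact Or.inl (Or.inr rfl)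
      · exact Or.inr ⟨d, hd, rfl⟩

theorem nodup_foldl_add_snd (l : List (Int × Int)) (cols : PySem.Set Int)
    (h : cols.Nodup) : (l.foldl (fun s c => PySem.Set.add s c.2) cols).Nodup := by
  induction l generalizing cols with
  | nil => exact h
  | cons c cs ih => exact ih _ (PySem.Set.nodup_add cols c.2 h)

-- ##### the BFS characterisation #####
theorem bfsA_run (land : List (List Int)) (n m : Int) :
    ∀ (fuel : Nat) (q : List (Int × Int)) (vis : PySem.Set (Int × Int))
      (size : Int) (cols : PySem.Set Int),
    vis.Nodup → q.Nodup → (∀ c ∈ q, c ∈ vis) →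
    (∀ c ∈ vis, c ∉ q → ∀ b, AdjP c b → GoodP land n m b → b ∈ vis) →
    cols.Nodup →
    2 * ((goodFin land n m) \ vis.toFinset).card + q.length ≤ fuel →
    (∀ x, x ∈ (bfsA land n m fuel q vis size cols).1 ↔ clP land n m (· ∈ vis) x) ∧
    (bfsA land n m fuel q vis size cols).1.Nodup ∧
    (bfsA land n m fuel q vis size cols).2.1 =
      size + (((bfsA land n m fuel q vis size cols).1.toFinset.card : Int)
        - (vis.toFinset.card : Int)) ∧
    (∀ c, c ∈ (bfsA land n m fuel q vis size cols).2.2 ↔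
      c ∈ cols ∨ ∃ x, (x, c) ∈ (bfsA land n m fuel q vis size cols).1 ∧ (x, c) ∉ vis) ∧
    (bfsA land n m fuel q vis size cols).2.2.Nodup := by
  intro fuel
  induction fuel with
  | zero =>
    intro q vis size cols hvnd _ _ _ hcols hfuel
    have hgood : ((goodFin land n m) \ vis.toFinset).card = 0 := by omega
    have hvc : ClosedP land n m (· ∈ vis) := by
      intro a _ b hab hb
      by_contra hbv
      have hmem : b ∈ (goodFin land n m) \ vis.toFinset :=
        Finset.mem_sdiff.mpr ⟨mem_goodFin.mpr hb, by simpa using hbv⟩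
      have := Finset.card_pos.mpr ⟨b, hmem⟩
      omega
    refine ⟨fun x => (cl_of_closed hvc x).symm, hvnd, ?_, ?_, hcols⟩
    · show size = size + ((vis.toFinset.card : Int) - (vis.toFinset.card : Int))
      ring
    · intro c
      show c ∈ cols ↔ c ∈ cols ∨ ∃ x, (x, c) ∈ vis ∧ (x, c) ∉ vis
      simp
  | succ fuel ih =>
    intro q vis size cols hvnd hqnd hqv hcl hcols hfuel
    match q with
    | [] =>
      have hvc : ClosedP land n m (· ∈ vis) := by
        intro a ha b hab hb
        exact hcl a ha (List.not_mem_nil) b hab hb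
      refine ⟨fun x => (cl_of_closed hvc x).symm, hvnd, ?_, ?_, hcols⟩
      · show size = size + ((vis.toFinset.card : Int) - (vis.toFinset.card : Int))
        ring
      · intro c
        show c ∈ cols ↔ c ∈ cols ∨ ∃ x, (x, c) ∈ vis ∧ (x, c) ∉ vis
        simp
    | c :: qs =>
      obtain ⟨hcq, hqnd'⟩ := List.nodup_cons.mp hqnd
      have hcvis : c ∈ vis := hqv c List.mem_cons_self
      set ns := nsF land n m vis (nbrsA c.1 c.2) with hns_def
      have hns_spec : ∀ d ∈ ns, GoodP land n m d ∧ d ∉ vis ∧ AdjP c d := by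
        intro d hd
        have := mem_nsF.mp hd
        exact ⟨this.2.1, this.2.2, this.1⟩
      have hns_nodup : ns.Nodup := nodup_nsF (nbrs_nodup c.1 c.2)
      have hstep : bfsA land n m (fuel + 1) (c :: qs) vis size cols =
          bfsA land n m fuel (qs ++ ns) (vis ++ ns) (size + ns.length)
            (ns.foldl (fun s d => PySem.Set.add s d.2) cols) := by
        show bfsA land n m fuel
          ((nbrsA c.1 c.2).foldl (stepA land n m) (qs, vis, size, cols)).1
          ((nbrsA c.1 c.2).foldl (stepA land n m) (qs, vis, size, cols)).2.1
          ((nbrsA c.1 c.2).foldl (stepA land n m) (qs, vis, size, cols)).2.2.1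
          ((nbrsA c.1 c.2).foldl (stepA land n m) (qs, vis, size, cols)).2.2.2 = _
        rw [foldA_spec land n m (nbrsA c.1 c.2) (nbrs_nodup c.1 c.2) qs vis size cols]
      -- Finset bookkeeping
      have hns_sub : ns.toFinset ⊆ (goodFin land n m) \ vis.toFinset := by
        intro d hd
        rw [List.mem_toFinset] at hd
        obtain ⟨hg, hnv, _⟩ := hns_spec d hd
        exact Finset.mem_sdiff.mpr ⟨mem_goodFin.mpr hg, by simpa using hnv⟩
      have hns_card : ns.toFinset.card = ns.length := List.toFinset_card_of_nodup hns_nodup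
      have hdisj : ∀ d ∈ ns, d ∉ vis := fun d hd => (hns_spec d hd).2.1
      have hvis'_fin : (vis ++ ns).toFinset = vis.toFinset ∪ ns.toFinset :=
        List.toFinset_append
      have hsdiff : (goodFin land n m) \ (vis ++ ns).toFinset =
          ((goodFin land n m) \ vis.toFinset) \ ns.toFinset := by
        rw [hvis'_fin]
        ext d
        simp [Finset.mem_sdiff]
        tauto
      have hcard_sub : ns.toFinset.card ≤ ((goodFin land n m) \ vis.toFinset).card :=
        Finset.card_le_card hns_sub
      have hcard' : ((goodFin land n m) \ (vis ++ ns).toFinset).card =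
          ((goodFin land n m) \ vis.toFinset).card - ns.length := by
        rw [hsdiff, Finset.card_sdiff, Finset.inter_eq_left.mpr hns_sub, hns_card]
      -- invariants for the recursive call
      have hvnd' : (vis ++ ns).Nodup := hvnd.append hns_nodup (by
        intro d hd1 hd2
        exact hdisj d hd2 hd1)
      have hqnd2 : (qs ++ ns).Nodup := hqnd'.append hns_nodup (by
        intro d hd1 hd2
        exact hdisj d hd2 (hqv d (List.mem_cons_of_mem _ hd1)))
      have hqv' : ∀ d ∈ qs ++ ns, d ∈ vis ++ ns := by
        intro d hd
        rcases List.mem_append.mp hd with h | h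
        · exact List.mem_append.mpr (Or.inl (hqv d (List.mem_cons_of_mem _ h)))
        · exact List.mem_append.mpr (Or.inr h)
      have hcl' : ∀ d ∈ vis ++ ns, d ∉ qs ++ ns →
          ∀ b, AdjP d b → GoodP land n m b → b ∈ vis ++ ns := by
        intro d hd hdq b hab hb
        rcases List.mem_append.mp hd with hdv | hdn
        · by_cases hdc : d = c
          · subst hdc
            by_cases hbv : b ∈ vis
            · exact List.mem_append.mpr (Or.inl hbv)
            · refine List.mem_append.mpr (Or.inr ?_)
              exact mem_nsF.mpr ⟨hab, hb, hbv⟩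
          · have hdqs : d ∉ qs := fun h => hdq (List.mem_append.mpr (Or.inl h))
            have : d ∉ c :: qs := by
              simp [hdc, hdqs]
            exact List.mem_append.mpr (Or.inl (hcl d hdv this b hab hb))
        · exact absurd (List.mem_append.mpr (Or.inr hdn)) hdq
      have hcols' : (ns.foldl (fun s d => PySem.Set.add s d.2) cols).Nodup :=
        nodup_foldl_add_snd ns cols hcols
      have hfuel' : 2 * ((goodFin land n m) \ (vis ++ ns).toFinset).card +
          (qs ++ ns).length ≤ fuel := by
        rw [hcard', List.length_append]
        simp only [List.length_cons] at hfuel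
        omega
      have H := ih (qs ++ ns) (vis ++ ns) (size + ns.length)
        (ns.foldl (fun s d => PySem.Set.add s d.2) cols)
        hvnd' hqnd2 hqv' hcl' hcols' hfuel'
      rw [hstep]
      obtain ⟨H1, H2, H3, H4, H5⟩ := H
      -- closure transfer
      have habsorb : ∀ x, clP land n m (· ∈ vis ++ ns) x ↔ clP land n m (· ∈ vis) x := by
        intro x
        apply cl_absorb
        · intro y hy
          rcases List.mem_append.mp hy with h | h
          · exact cl_base h
          · obtain ⟨hg, _, hadj⟩ := hns_spec y h
            exact cl_closed land n m _ c (cl_base hcvis) y hadj hg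
        · intro y hy
          exact List.mem_append.mpr (Or.inl hy)
      have hvis'_card : ((vis ++ ns).toFinset.card : Int) =
          (vis.toFinset.card : Int) + ns.length := by
        rw [hvis'_fin, Finset.card_union_of_disjoint, hns_card]
        · push_cast; ring
        · rw [Finset.disjoint_left]
          intro d hd1 hd2
          rw [List.mem_toFinset] at hd1 hd2
          exact hdisj d hd2 hd1
      refine ⟨fun x => (H1 x).trans (habsorb x), H2, ?_, ?_, H5⟩
      · rw [H3, hvis'_card]; ring
      · intro c'
        rw [H4 c', mem_foldl_add_snd]
        have hns_sub_r : ∀ d ∈ ns, d ∈ (bfsA land n m fuel (qs ++ ns) (vis ++ ns)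
            (size + ns.length) (ns.foldl (fun s d => PySem.Set.add s d.2) cols)).1 := by
          intro d hd
          exact (H1 d).mpr (cl_base (List.mem_append.mpr (Or.inr hd)))
        constructor
        · rintro ((h | ⟨d, hd, rfl⟩) | ⟨x, hx1, hx2⟩)
          · exact Or.inl h
          · exact Or.inr ⟨d.1, hns_sub_r d hd, hdisj d hd⟩
          · refine Or.inr ⟨x, hx1, fun hxv => hx2 (List.mem_append.mpr (Or.inl hxv))⟩
        · rintro (h | ⟨x, hx1, hx2⟩)
          · exact Or.inl (Or.inl h)
          · by_cases hxn : (x, c') ∈ ns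
            · exact Or.inl (Or.inr ⟨(x, c'), hxn, rfl⟩)
            · refine Or.inr ⟨x, hx1, ?_⟩
              intro hmem
              rcases List.mem_append.mp hmem with h | h
              · exact hx2 h
              · exact hxn h

-- ##### the saturation characterisation #####
theorem mem_growB {land : List (List Int)} {n m : Int} {comp : PySem.Set (Int × Int)}
    {x : Int × Int} :
    x ∈ growB land n m comp ↔
      (∃ p ∈ comp, AdjP p x) ∧ GoodP land n m x ∧ x ∉ comp := by
  simp only [growB, PySem.Set.mem_ofList, List.mem_filter, List.mem_flatMap,
    decide_eq_true_eq]
  constructor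
  · rintro ⟨⟨p, hp, hx⟩, h1, h2, h3, h4, h5, h6⟩
    exact ⟨⟨p, hp, hx⟩, ⟨h1, h2, h3, h4, h5⟩, h6⟩
  · rintro ⟨⟨p, hp, hx⟩, ⟨h1, h2, h3, h4, h5⟩, h6⟩
    exact ⟨⟨p, hp, hx⟩, h1, h2, h3, h4, h5, h6⟩

theorem satB_run (land : List (List Int)) (n m : Int) :
    ∀ (fuel : Nat) (comp : PySem.Set (Int × Int)),
    comp.Nodup → (∀ c ∈ comp, GoodP land n m c) →
    (goodFin land n m).card + 1 - comp.toFinset.card ≤ fuel →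
    (∀ x, x ∈ satB land n m fuel comp ↔ clP land n m (· ∈ comp) x) ∧
    (satB land n m fuel comp).Nodup ∧
    (∀ c ∈ satB land n m fuel comp, GoodP land n m c) := by
  intro fuel
  induction fuel with
  | zero =>
    intro comp hnd hgood hfuel
    have hsub : comp.toFinset ⊆ goodFin land n m := by
      intro d hd
      rw [List.mem_toFinset] at hd
      exact mem_goodFin.mpr (hgood d hd)
    have := Finset.card_le_card hsub
    omega
  | succ fuel ih =>
    intro comp hnd hgood hfuel
    by_cases hnw : (growB land n m comp).isEmpty = true
    · have hnil : growB land n m comp = [] := List.isEmpty_iff.mp hnw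
      have hc : ClosedP land n m (· ∈ comp) := by
        intro a ha b hab hb
        by_contra hbc
        have hmem : b ∈ growB land n m comp := mem_growB.mpr ⟨⟨a, ha, hab⟩, hb, hbc⟩
        rw [hnil] at hmem
        exact List.not_mem_nil hmem
      have hred : satB land n m (fuel + 1) comp = comp := by
        simp [satB, hnw]
      rw [hred]
      exact ⟨fun x => (cl_of_closed hc x).symm, hnd, hgood⟩
    · have hne : growB land n m comp ≠ [] := fun h => hnw (by simp [h])
      obtain ⟨e, he⟩ := List.exists_mem_of_ne_nil _ hne
      have he' := mem_growB.mp he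
      have hred : satB land n m (fuel + 1) comp =
          satB land n m fuel (PySem.Set.union comp (growB land n m comp)) := by
        simp [satB, hnw]
      have hmem' := PySem.Set.mem_union comp (growB land n m comp)
      have hnd' : (PySem.Set.union comp (growB land n m comp)).Nodup :=
        PySem.Set.nodup_union comp _ hnd
      have hgood' : ∀ c ∈ PySem.Set.union comp (growB land n m comp),
          GoodP land n m c := by
        intro c hc
        rcases (hmem' c).mp hc with h | h
        · exact hgood c h
        · exact (mem_growB.mp h).2.1
      have hcard : comp.toFinset.card <
          (PySem.Set.union comp (growB land n m comp)).toFinset.card := by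
        apply Finset.card_lt_card
        constructor
        · intro d hd
          rw [List.mem_toFinset] at hd ⊢
          exact (hmem' d).mpr (Or.inl hd)
        · intro hsub
          have : e ∈ comp.toFinset := hsub (by
            rw [List.mem_toFinset]
            exact (hmem' e).mpr (Or.inr he))
          rw [List.mem_toFinset] at this
          exact he'.2.2 this
      have H := ih (PySem.Set.union comp (growB land n m comp)) hnd' hgood' (by omega)
      rw [hred]
      have habsorb : ∀ x,
          clP land n m (· ∈ PySem.Set.union comp (growB land n m comp)) x ↔
          clP land n m (· ∈ comp) x := by
        intro x
        apply cl_absorb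
        · intro y hy
          rcases (hmem' y).mp hy with h | h
          · exact cl_base h
          · obtain ⟨⟨p, hp, hadj⟩, hg, _⟩ := mem_growB.mp h
            exact cl_closed land n m _ p (cl_base hp) y hadj hg
        · intro y hy
          exact (hmem' y).mpr (Or.inl hy)
      exact ⟨fun x => (H.1 x).trans (habsorb x), H.2.1, H.2.2⟩

-- ##### the column-bump fold (A side) #####
theorem bumpFold_char (size : Int) :
    ∀ (S : List Int) (co : List Int), S.Nodup →
    (∀ c ∈ S, 0 ≤ c ∧ c < (co.length : Int)) →
    (S.foldl (bumpA size) co).length = co.length ∧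
    ∀ k : Nat, k < co.length →
      (S.foldl (bumpA size) co).getD k 0 =
        (if (k : Int) ∈ S then co.getD k 0 + size else co.getD k 0) := by
  intro S
  induction S with
  | nil => intro co _ _; exact ⟨rfl, fun k _ => by simp⟩
  | cons c S ih =>
    intro co hnd hb
    obtain ⟨hcS, hnd'⟩ := List.nodup_cons.mp hnd
    have hc := hb c List.mem_cons_self
    have hbump : bumpA size co c = co.set c.toNat (co.getD c.toNat 0 + size) := by
      unfold bumpA
      rw [PySem.List.pySetD_of_nonneg _ _ hc.1,
        PySem.List.pyGetD_eq_getElem _ _ hc.1 hc.2, List.getD_eq_getElem _ _ (by omega)]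
    have hblen : (bumpA size co c).length = co.length := by
      rw [hbump, List.length_set]
    have hb' : ∀ d ∈ S, 0 ≤ d ∧ d < ((bumpA size co c).length : Int) := by
      intro d hd
      rw [hblen]
      exact hb d (List.mem_cons_of_mem _ hd)
    obtain ⟨ihlen, ihget⟩ := ih (bumpA size co c) hnd' hb'
    refine ⟨by rw [List.foldl_cons, ihlen, hblen], ?_⟩
    intro k hk
    rw [List.foldl_cons, ihget k (by omega)]
    have hset : (bumpA size co c).getD k 0 =
        if (k : Int) = c then co.getD k 0 + size else co.getD k 0 := by
      rw [hbump]
      rcases eq_or_ne (k : Int) c with hkc | hkc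
      · have hck : c.toNat = k := by omega
        subst hck
        rw [if_pos hkc, List.getD_eq_getElem?_getD, List.getElem?_set, if_pos rfl,
          if_pos hk]
        simp
      · have : c.toNat ≠ k := by omega
        rw [if_neg hkc, List.getD_eq_getElem?_getD, List.getElem?_set, if_neg this,
          ← List.getD_eq_getElem?_getD]
    by_cases hkS : (k : Int) ∈ S
    · have hkc : (k : Int) ≠ c := fun h => hcS (h ▸ hkS)
      rw [if_pos hkS, if_pos (List.mem_cons_of_mem _ hkS), hset, if_neg hkc]
    · rw [if_neg hkS, hset]
      rcases eq_or_ne (k : Int) c with hkc | hkc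
      · rw [if_pos hkc, if_pos (by exact List.mem_cons.mpr (Or.inl hkc))]
      · rw [if_neg hkc, if_neg (by simp [hkc, hkS])]

-- ##### the per-column sum (B side) #####
theorem colSumB_append (comps : List (PySem.Set (Int × Int)))
    (C : PySem.Set (Int × Int)) (c : Int) :
    colSumB (comps ++ [C]) c =
      colSumB comps c + (if C.any (fun x => x.2 == c) then PySem.Set.len C else 0) := by
  unfold colSumB
  rw [List.foldl_append]
  rfl

theorem any_snd_iff (C : PySem.Set (Int × Int)) (c : Int) :
    C.any (fun x => x.2 == c) = true ↔ ∃ x, (x, c) ∈ C := by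
  rw [List.any_eq_true]
  constructor
  · rintro ⟨⟨a, b⟩, hx, hb⟩
    simp only [beq_iff_eq] at hb
    exact ⟨a, hb ▸ hx⟩
  · rintro ⟨x, hx⟩
    exact ⟨(x, c), hx, by simp⟩

-- ##### the scan-state relation and the per-cell step #####
def RelS (land : List (List Int)) (n m : Int)
    (a : PySem.Set (Int × Int) × List Int)
    (b : PySem.Set (Int × Int) × List (PySem.Set (Int × Int))) : Prop :=
  (∀ x, x ∈ a.1 ↔ x ∈ b.1) ∧ a.1.Nodup ∧ ClosedP land n m (· ∈ a.1) ∧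
  a.2.length = m.toNat ∧
  ∀ k : Nat, k < m.toNat → a.2.getD k 0 = colSumB b.2 (k : Int)

theorem scan_step (land : List (List Int)) (n m : Int)
    (st : PySem.Set (Int × Int) × List Int)
    (st' : PySem.Set (Int × Int) × List (PySem.Set (Int × Int))) (p : Int × Int)
    (hp : 0 ≤ p.1 ∧ p.1 < n ∧ 0 ≤ p.2 ∧ p.2 < m)
    (h : RelS land n m st st') :
    RelS land n m (scanA land n m st p) (collectB land n m st' p) := by
  obtain ⟨hmem, hand, hclosed, hlen, hcol⟩ := h
  by_cases hg : cellA land p.1 p.2 = 1 ∧ p ∉ st.1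
  case neg =>
    have hg' : ¬ (cellB land p.1 p.2 = 1 ∧ p ∉ st'.1) := by
      intro hx
      exact hg ⟨hx.1, fun hm => hx.2 ((hmem p).mp hm)⟩
    simp only [scanA, collectB, if_neg hg, if_neg hg']
    exact ⟨hmem, hand, hclosed, hlen, hcol⟩
  case pos =>
  have hg' : cellB land p.1 p.2 = 1 ∧ p ∉ st'.1 :=
    ⟨hg.1, fun hm => hg.2 ((hmem p).mpr hm)⟩
  have hgp : GoodP land n m p := ⟨hp.1, hp.2.1, hp.2.2.1, hp.2.2.2, hg.1⟩
  have haddA : PySem.Set.add st.1 p = st.1 ++ [p] := PySem.Set.add_of_not_mem hg.2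
  have haddc : PySem.Set.add PySem.Set.empty p.2 = [p.2] := rfl
  have hp0 : PySem.Set.add PySem.Set.empty p = [p] := rfl
  -- A-side BFS facts
  have hvnd0 : (st.1 ++ [p]).Nodup := by
    refine hand.append (List.nodup_singleton p) ?_
    intro d hd1 hd2
    rw [List.mem_singleton] at hd2
    subst hd2
    exact hg.2 hd1
  have hcl0 : ∀ c ∈ st.1 ++ [p], c ∉ [p] → ∀ b, AdjP c b → GoodP land n m b →
      b ∈ st.1 ++ [p] := by
    intro c hc hcp b hab hb
    rcases List.mem_append.mp hc with h1 | h1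
    · exact List.mem_append.mpr (Or.inl (hclosed c h1 b hab hb))
    · exact absurd h1 hcp
  have hfuelA : 2 * ((goodFin land n m) \ (st.1 ++ [p]).toFinset).card +
      ([p] : List (Int × Int)).length ≤ 2 * (n.toNat * m.toNat) + 1 := by
    have h1 : ((goodFin land n m) \ (st.1 ++ [p]).toFinset).card ≤
        (goodFin land n m).card := Finset.card_le_card Finset.sdiff_subset
    have h2 := goodFin_card land n m
    simp only [List.length_singleton]
    omega
  have HA := bfsA_run land n m (2 * (n.toNat * m.toNat) + 1) [p] (st.1 ++ [p]) 1
    (PySem.Set.add PySem.Set.empty p.2) hvnd0 (List.nodup_singleton p)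
    (by
      intro c hc
      rw [List.mem_singleton] at hc
      subst hc
      exact List.mem_append.mpr (Or.inr (List.mem_singleton.mpr rfl)))
    hcl0 (by rw [haddc]; exact List.nodup_singleton p.2) hfuelA
  -- B-side saturation facts
  have HB := satB_run land n m (n.toNat * m.toNat + 1) [p] (List.nodup_singleton p)
    (by
      intro c hc
      rw [List.mem_singleton] at hc
      subst hc
      exact hgp)
    (by
      have h2 := goodFin_card land n m
      have h3 : ([p] : List (Int × Int)).toFinset.card = 1 := by simp
      omega)
  set r := bfsA land n m (2 * (n.toNat * m.toNat) + 1) [p] (st.1 ++ [p]) 1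
    (PySem.Set.add PySem.Set.empty p.2) with hrdef
  set C := satB land n m (n.toNat * m.toNat + 1) [p] with hCdef
  -- membership translations
  have hCp : ∀ x, x ∈ C ↔ clP land n m (· = p) x := by
    intro x
    exact (HB.1 x).trans (cl_congr (fun y => by simp) x)
  have hr1 : ∀ x, x ∈ r.1 ↔ (x ∈ st.1 ∨ clP land n m (· = p) x) := by
    intro x
    have h1 : ∀ y : Int × Int, y ∈ st.1 ++ [p] ↔ (y ∈ st.1 ∨ y = p) := by simp
    exact (HA.1 x).trans ((cl_congr h1 x).trans (cl_union_left hclosed x))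
  have hdisjC : ∀ x, clP land n m (· = p) x → x ∉ st.1 :=
    fun x hx => cl_disjoint hclosed hg.2 hgp hx
  have hCnd := HB.2.1
  -- size agreement
  have hrfin : r.1.toFinset = st.1.toFinset ∪ C.toFinset := by
    ext x
    simp only [List.mem_toFinset, Finset.mem_union]
    rw [hr1 x, hCp x]
  have hdisjF : Disjoint st.1.toFinset C.toFinset := by
    rw [Finset.disjoint_left]
    intro x hx1 hx2
    rw [List.mem_toFinset] at hx1 hx2
    exact hdisjC x ((hCp x).mp hx2) hx1
  have hvis0card : (st.1 ++ [p]).toFinset.card = st.1.toFinset.card + 1 := by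
    rw [List.toFinset_append, Finset.card_union_of_disjoint (by simp [hg.2]),
      List.toFinset_cons, List.toFinset_nil]
    simp
  have hrcard : r.1.toFinset.card = st.1.toFinset.card + C.length := by
    rw [hrfin, Finset.card_union_of_disjoint hdisjF, List.toFinset_card_of_nodup hCnd]
  have hsizes : r.2.1 = PySem.Set.len C := by
    have hlenC : PySem.Set.len C = (C.length : Int) := rfl
    rw [HA.2.2.1, hlenC, hrcard, hvis0card]
    push_cast
    ring
  -- column-set agreement: A's cols set holds exactly the columns C touches
  have hST : ∀ c, c ∈ r.2.2 ↔ ∃ x, (x, c) ∈ C := by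
    intro c
    rw [HA.2.2.2.1 c, haddc, List.mem_singleton]
    constructor
    · rintro (rfl | ⟨x, hx1, hx2⟩)
      · exact ⟨p.1, (hCp p).mpr (cl_base rfl)⟩
      · refine ⟨x, (hCp (x, c)).mpr ?_⟩
        rcases (hr1 (x, c)).mp hx1 with h1 | h1
        · exact absurd (List.mem_append.mpr (Or.inl h1)) hx2
        · exact h1
    · rintro ⟨x, hx⟩
      have hcl := (hCp (x, c)).mp hx
      by_cases hxp : (x, c) = p
      · exact Or.inl (congrArg Prod.snd hxp)
      · refine Or.inr ⟨x, (hr1 (x, c)).mpr (Or.inr hcl), ?_⟩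
        intro hmem0
        rcases List.mem_append.mp hmem0 with h1 | h1
        · exact hdisjC (x, c) hcl h1
        · exact hxp (List.mem_singleton.mp h1)
  have hbound : ∀ c ∈ r.2.2, 0 ≤ c ∧ c < (st.2.length : Int) := by
    intro c hc
    have hcm : 0 ≤ c ∧ c < m := by
      rcases (HA.2.2.2.1 c).mp hc with h1 | ⟨x, hx1, hx2⟩
      · rw [haddc, List.mem_singleton] at h1
        subst h1
        exact ⟨hp.2.2.1, hp.2.2.2⟩
      · have hcl : clP land n m (· = p) (x, c) := by
          rcases (hr1 (x, c)).mp hx1 with h1 | h1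
          · exact absurd (List.mem_append.mpr (Or.inl h1)) hx2
          · exact h1
        rcases cl_good_or hcl with h1 | h1
        · have : c = p.2 := congrArg Prod.snd h1
          subst this
          exact ⟨hp.2.2.1, hp.2.2.2⟩
        · exact ⟨h1.2.2.1, h1.2.2.2.1⟩
    rw [hlen]
    omega
  obtain ⟨hblen, hbget⟩ := bumpFold_char r.2.1 r.2.2 st.2 HA.2.2.2.2 hbound
  -- assemble
  simp only [scanA, collectB, if_pos hg, if_pos hg', haddA, hp0, ← hrdef, ← hCdef]
  refine ⟨?_, HA.2.1, ?_, by rw [hblen, hlen], ?_⟩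
  · intro x
    rw [hr1 x, PySem.Set.mem_union, hmem x, hCp x]
  · refine closed_congr (fun x => ?_) (closed_union hclosed (cl_closed land n m (· = p)))
    rw [hr1 x]
  · intro k hk
    rw [hbget k (by omega), colSumB_append, ← hcol k hk, ← hsizes]
    by_cases hkC : ∃ x, (x, (k : Int)) ∈ C
    · rw [if_pos ((hST (k : Int)).mpr hkC), if_pos ((any_snd_iff C (k : Int)).mpr hkC)]
    · rw [if_neg (fun h => hkC ((hST (k : Int)).mp h)),
        if_neg (fun h => hkC ((any_snd_iff C (k : Int)).mp h))]
      omega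

theorem fold_cells (land : List (List Int)) (n m : Int) :
    ∀ (cells : List (Int × Int)) (st : PySem.Set (Int × Int) × List Int)
      (st' : PySem.Set (Int × Int) × List (PySem.Set (Int × Int))),
    (∀ p ∈ cells, 0 ≤ p.1 ∧ p.1 < n ∧ 0 ≤ p.2 ∧ p.2 < m) →
    RelS land n m st st' →
    RelS land n m (cells.foldl (scanA land n m) st)
      (cells.foldl (collectB land n m) st') := by
  intro cells
  induction cells with
  | nil => intro st st' _ h; exact h
  | cons p cs ih =>
    intro st st' hb h
    exact ih _ _ (fun q hq => hb q (List.mem_cons_of_mem _ hq))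
      (scan_step land n m st st' p (hb p (List.mem_cons_self)) h)

-- ===== VERDICT (by name: the statement is the Claim_ definition above) =====
theorem solution_spec : Claim_equal_solution := by
  intro land _ _
  unfold Spec_solution solution solution_alt
  set m : Int := (((PySem.List.pyGet? land 0).getD []).length : Int) with hm
  have h := fold_cells land (land.length : Int) m
    ((PySem.List.pyRange 0 (land.length : Int) 1).flatMap
      (fun i => (PySem.List.pyRange 0 m 1).map (fun j => (i, j))))
    (PySem.Set.empty, List.replicate m.toNat 0)
    (PySem.Set.empty, [])
    ?_ ?_
  · obtain ⟨_, _, _, h4, h5⟩ := h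
    set stA := ((PySem.List.pyRange 0 (land.length : Int) 1).flatMap
      (fun i => (PySem.List.pyRange 0 m 1).map (fun j => (i, j)))).foldl
      (scanA land (land.length : Int) m) (PySem.Set.empty, List.replicate m.toNat 0)
    set stB := ((PySem.List.pyRange 0 (land.length : Int) 1).flatMap
      (fun i => (PySem.List.pyRange 0 m 1).map (fun j => (i, j)))).foldl
      (collectB land (land.length : Int) m) (PySem.Set.empty, [])
    show (PySem.List.max? stA.2 (fun v => v)).getD 0 =
      (PySem.List.max? ((PySem.List.pyRange 0 m 1).map (fun c => colSumB stB.2 c))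
        (fun v => v)).getD 0
    have hlist : stA.2 = (PySem.List.pyRange 0 m 1).map (fun c => colSumB stB.2 c) := by
      apply List.ext_getElem
      · rw [h4, List.length_map, PySem.List.length_pyRange_one]
        simp [hm]
      · intro k hk1 hk2
        have hkm : k < m.toNat := by rw [h4] at hk1; exact hk1
        have e1 : stA.2[k] = stA.2.getD k 0 := (List.getD_eq_getElem _ _ hk1).symm
        rw [e1, h5 k hkm, List.getElem_map, PySem.List.getElem_pyRange_one]
        norm_num
    rw [hlist]
  · intro p hp
    simp only [List.mem_flatMap, List.mem_map] at hp
    obtain ⟨i, hi, j, hj, rfl⟩ := hp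
    rw [PySem.List.mem_pyRange_one] at hi hj
    exact ⟨hi.1, hi.2, hj.1, hj.2⟩
  · refine ⟨fun x => Iff.rfl, List.nodup_nil, ?_, by simp, ?_⟩
    · intro a ha; simp [PySem.Set.empty] at ha
    · intro k hk
      simp [colSumB]
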